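-- pv_equiv track=rewrite | github.com/username1565/incompressible_data | try_to_reduce_Shannon_entropy.py | count_null_ones
-- ===== SOURCE A (Python) =====
-- def count_null_ones(binary_string):	#binary_string: "011010010...0010010..."
--
-- 	#	Подcчитаем количества комбинаций '0', '1':
-- 	nulls	=	0;
-- 	ones 	=	0;
-- 	if(len(binary_string)%2 == 1): binary_string = '0'+binary_string;
-- 	for i in range(0, len(binary_string)):
-- 		if(binary_string[i]=='1'):
-- 			ones	+=	1;
-- 		elif(binary_string[i]=='0'):
-- 			nulls	+=	1;
--
-- 	#	Подсчитаем количества комбинаций '00', '01', '10', '11':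
-- 	null_null	=	0;
-- 	null_one	=	0;
-- 	one_null	=	0;
-- 	one_one		=	0;
-- 	for i in range(0, len(binary_string), 2):
-- 		if		(	binary_string[i] == '0'	and	binary_string[i+1] == '0'	):
-- 			null_null	+=	1;
-- 		elif	(	binary_string[i] == '0'	and	binary_string[i+1] == '1'	):
-- 			null_one	+=	1;
-- 		elif	(	binary_string[i] == '1'	and	binary_string[i+1] == '0'	):
-- 			one_null	+=	1;
-- 		elif	(	binary_string[i] == '1'	and	binary_string[i+1] == '1'	):
-- 			one_one		+=	1;
-- 	return [	#	Вернуть массив с объектами.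
-- 				{
-- 					'0': nulls,
-- 					'1': ones
-- 				},
-- 				{
-- 					'00': null_null,
-- 					'01': null_one,
-- 					'10': one_null,
-- 					'11': one_one
-- 				}
-- 	];
-- ===== SOURCE B (Python) =====
-- def count_null_ones(binary_string):
--     # Pad to even length, materialise the consecutive-pair list with the
--     # iterator-pairing idiom, then answer every counter as a count query
--     # on the data (no hand-maintained counters, no branch chains).
--     if len(binary_string) % 2:
--         binary_string = '0' + binary_string
--     cs = list(binary_string)
--     it = iter(cs)
--     pairs = list(zip(it, it))
--     return [
--         {'0': cs.count('0'), '1': cs.count('1')},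
--         {'00': pairs.count(('0', '0')), '01': pairs.count(('0', '1')),
--          '10': pairs.count(('1', '0')), '11': pairs.count(('1', '1'))},
--     ]
-- ===== Notes on version B (the rewrite author's own statement) =====
-- stated objective: idiomatic
-- what changed: A maintains six counters across two explicit scanning loops with if/elif chains; B builds the consecutive-pair list once (zip over one iterator) and obtains every entry as a library count query (list.count) on the characters and on the pair list.
import Mathlib
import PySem

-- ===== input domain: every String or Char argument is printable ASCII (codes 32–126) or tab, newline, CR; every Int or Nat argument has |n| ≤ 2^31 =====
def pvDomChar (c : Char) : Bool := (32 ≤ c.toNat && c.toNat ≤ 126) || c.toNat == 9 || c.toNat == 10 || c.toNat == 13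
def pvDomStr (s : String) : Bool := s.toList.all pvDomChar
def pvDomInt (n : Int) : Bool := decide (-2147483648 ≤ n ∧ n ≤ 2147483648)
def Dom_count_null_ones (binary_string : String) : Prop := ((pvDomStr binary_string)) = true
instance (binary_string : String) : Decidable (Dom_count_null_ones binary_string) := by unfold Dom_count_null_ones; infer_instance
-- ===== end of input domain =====

-- B replaces A's two counter-maintaining scans (if/elif chains over six
-- counters) by building the consecutive-pair list once and reading every
-- entry off as a library count query; same return value.

-- ===== PORT A =====
-- first loop of A: for i in range(len(s)): count '1's and '0's
def pvA_chars : List Char → Int → Int → Int × Int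
  | [], nulls, ones => (nulls, ones)
  | c :: rest, nulls, ones =>
    if c = '1' then pvA_chars rest nulls (ones + 1)
    else if c = '0' then pvA_chars rest (nulls + 1) ones
    else pvA_chars rest nulls ones

-- second loop of A: for i in range(0, len(s), 2): classify (s[i], s[i+1]).
-- the padded string has even length, so s[i+1] never raises; the structural
-- two-at-a-time recursion is exact there (the singleton case is unreachable).
def pvA_pairs : List Char → Int → Int → Int → Int → Int × Int × Int × Int
  | a :: b :: rest, nn, no, on, oo =>
    if a = '0' ∧ b = '0' then pvA_pairs rest (nn + 1) no on oo
    else if a = '0' ∧ b = '1' then pvA_pairs rest nn (no + 1) on oo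
    else if a = '1' ∧ b = '0' then pvA_pairs rest nn no (on + 1) oo
    else if a = '1' ∧ b = '1' then pvA_pairs rest nn no on (oo + 1)
    else pvA_pairs rest nn no on oo
  | _, nn, no, on, oo => (nn, no, on, oo)

def count_null_ones (binary_string : String) : List (List (String × Int)) :=
  let s := binary_string.toList
  let s := if s.length % 2 = 1 then '0' :: s else s
  let co := pvA_chars s 0 0
  let po := pvA_pairs s 0 0 0 0
  [ [("0", co.1), ("1", co.2)],
    [("00", po.1), ("01", po.2.1), ("10", po.2.2.1), ("11", po.2.2.2)] ]

-- ===== PORT B =====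
-- list(zip(it, it)) on one iterator: consecutive disjoint pairs (a trailing
-- odd element would be dropped; the padded list is even, so none is).
def pvChunk2 : List Char → List (Char × Char)
  | a :: b :: rest => (a, b) :: pvChunk2 rest
  | _ => []

def count_null_ones_alt (binary_string : String) : List (List (String × Int)) :=
  let cs := binary_string.toList
  let cs := if cs.length % 2 = 1 then '0' :: cs else cs
  let pairs := pvChunk2 cs
  [ [("0", (cs.count '0' : Int)), ("1", (cs.count '1' : Int))],
    [("00", (pairs.count ('0', '0') : Int)), ("01", (pairs.count ('0', '1') : Int)),
     ("10", (pairs.count ('1', '0') : Int)), ("11", (pairs.count ('1', '1') : Int))] ]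

-- ===== PRECONDITION & SPEC =====
def Spec_count_null_ones (binary_string : String) (out : List (List (String × Int))) : Prop := out = count_null_ones_alt binary_string
instance (binary_string : String) (out : List (List (String × Int))) : Decidable (Spec_count_null_ones binary_string out) := by unfold Spec_count_null_ones; infer_instance

-- ===== CLAIM (what is proved, stated in full; the proofs are below) =====
def Claim_equal_count_null_ones : Prop := ∀ (binary_string : String), Dom_count_null_ones binary_string → Spec_count_null_ones binary_string (count_null_ones binary_string)

-- ===== LEMMAS AND PROOFS =====

theorem pvA_chars_eq : ∀ (l : List Char) (nulls ones : Int),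
    pvA_chars l nulls ones = (nulls + (l.count '0' : Int), ones + (l.count '1' : Int))
  | [], nulls, ones => by simp [pvA_chars]
  | c :: rest, nulls, ones => by
    simp only [pvA_chars]
    by_cases h1 : c = '1' <;> by_cases h0 : c = '0' <;>
      simp_all [pvA_chars_eq rest] <;> ring_nf

theorem pvA_pairs_eq : ∀ (l : List Char), l.length % 2 = 0 →
    ∀ nn no on oo : Int,
      pvA_pairs l nn no on oo =
        (nn + ((pvChunk2 l).count ('0', '0') : Int),
         no + ((pvChunk2 l).count ('0', '1') : Int),
         on + ((pvChunk2 l).count ('1', '0') : Int),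
         oo + ((pvChunk2 l).count ('1', '1') : Int))
  | [], _, _, _, _, _ => by simp [pvA_pairs, pvChunk2]
  | [_], h, _, _, _, _ => by simp at h
  | a :: b :: rest, h, nn, no, on, oo => by
    have ih := pvA_pairs_eq rest (by simp at h; omega)
    simp only [pvA_pairs, pvChunk2]
    by_cases ha0 : a = '0' <;> by_cases ha1 : a = '1' <;>
      by_cases hb0 : b = '0' <;> by_cases hb1 : b = '1' <;>
      simp_all [Prod.ext_iff] <;> ring_nf

theorem count_null_ones_spec : Claim_equal_count_null_ones := by
  intro s _
  unfold Spec_count_null_ones count_null_ones count_null_ones_alt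
  have hev : (if s.toList.length % 2 = 1 then '0' :: s.toList
      else s.toList).length % 2 = 0 := by
    split
    · rename_i h; simp only [List.length_cons]; omega
    · rename_i h; omega
  simp only [pvA_chars_eq, pvA_pairs_eq _ hev, zero_add]
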